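-- pv_equiv track=rewrite | github.com/SheldonHH/RustMap | scaffolding_py_tools/GlobDep_FnDep.py | find_roots_from_sccs
-- ===== SOURCE A (Python) =====
-- def find_roots_from_sccs(sccs, adj_list):
--     all_scc_targets = []
--     for scc in sccs:
--         targets = []
--         for node in scc:
--             targets.extend([n for n in adj_list.get(node, []) if n not in scc])
--         all_scc_targets.extend(targets)
--
--     all_scc_targets = set(all_scc_targets)
--     root_sccs = [scc for scc in sccs if not any(node in all_scc_targets for node in scc)]
--     return root_sccs
-- ===== SOURCE B (Python) =====
-- def find_roots_from_sccs(sccs, adj_list):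
--     # node -> list of (sets of) the SCCs that contain it, built in one pass
--     owners = {}
--     for scc in sccs:
--         scc_set = set(scc)
--         for node in scc:
--             owners.setdefault(node, []).append(scc_set)
--     # single edge-driven pass: an edge u -> n leaving one of u's SCCs makes n a target
--     targets = set()
--     for u, nbrs in adj_list.items():
--         own = owners.get(u, [])
--         for n in nbrs:
--             if any(n not in s for s in own):
--                 targets.add(n)
--     return [scc for scc in sccs if targets.isdisjoint(scc)]
-- ===== Notes on version B (the rewrite author's own statement) =====
-- stated objective: faster
-- what changed: A collects, per SCC, the outgoing cross-SCC targets of each node (testing 'n not in scc' by list scan) and then filters; B builds a node->owning-SCC-sets map once and makes a single edge-driven pass over the adjacency entries marking targets via O(1) set membership, then filters with set.isdisjoint.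
import Mathlib
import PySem

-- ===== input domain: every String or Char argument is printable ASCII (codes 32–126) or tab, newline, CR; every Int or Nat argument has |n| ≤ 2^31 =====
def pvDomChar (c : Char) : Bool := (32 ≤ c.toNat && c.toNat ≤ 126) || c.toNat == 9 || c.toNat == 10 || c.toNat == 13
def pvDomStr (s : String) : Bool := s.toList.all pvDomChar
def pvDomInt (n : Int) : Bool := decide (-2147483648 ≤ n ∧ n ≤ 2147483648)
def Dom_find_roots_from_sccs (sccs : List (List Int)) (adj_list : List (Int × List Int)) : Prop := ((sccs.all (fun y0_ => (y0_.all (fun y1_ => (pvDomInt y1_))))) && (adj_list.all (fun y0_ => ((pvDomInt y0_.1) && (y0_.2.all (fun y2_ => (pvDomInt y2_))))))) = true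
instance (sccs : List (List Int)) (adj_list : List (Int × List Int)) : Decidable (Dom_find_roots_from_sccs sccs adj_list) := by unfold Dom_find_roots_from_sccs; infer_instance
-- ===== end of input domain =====

-- B replaces A's per-SCC collection of cross-SCC targets (with list-scan membership tests)
-- by a node→owning-SCC-sets map built once and a single edge-driven marking pass; objective: faster.

-- ===== PORT A =====
def find_roots_from_sccs (sccs : List (List Int)) (adj_list : List (Int × List Int)) : List (List Int) :=
  let all_scc_targets : List Int :=
    sccs.foldl (fun acc scc =>
      let targets : List Int :=
        scc.foldl (fun targets node =>
          targets ++ ((PySem.Dict.mk adj_list).getD node []).filter (fun n => !(scc.contains n))) []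
      acc ++ targets) []
  let tset : PySem.Set Int := PySem.Set.ofList all_scc_targets
  sccs.filter (fun scc => !(scc.any (fun node => tset.contains node)))

-- ===== PORT B =====
-- items of the Python dict under the convention (first binding wins): the key-deduplicated entry list
def pvFirstItems (adj_list : List (Int × List Int)) : List (Int × List Int) :=
  adj_list.foldl (fun acc kv => if acc.any (fun p => p.1 == kv.1) then acc else acc ++ [kv]) []

-- B's local `owners`: node → list of the (sets of the) SCCs that contain it
def pvOwners (sccs : List (List Int)) : PySem.Dict Int (List (PySem.Set Int)) :=
  sccs.foldl (fun d scc =>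
    let scc_set := PySem.Set.ofList scc
    scc.foldl (fun d node => d.modify node [] (fun ls => ls ++ [scc_set])) d) PySem.Dict.empty

-- B's local `targets`: single edge-driven pass over the adjacency entries
def pvTargets (sccs : List (List Int)) (adj_list : List (Int × List Int)) : PySem.Set Int :=
  (pvFirstItems adj_list).foldl (fun T p =>
    let own := (pvOwners sccs).getD p.1 []
    p.2.foldl (fun T n =>
      if own.any (fun s => !(PySem.Set.contains s n)) then PySem.Set.add T n else T) T)
    PySem.Set.empty

def find_roots_from_sccs_alt (sccs : List (List Int)) (adj_list : List (Int × List Int)) : List (List Int) :=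
  sccs.filter (fun scc => PySem.Set.isdisjoint (pvTargets sccs adj_list) scc)

-- ===== PRECONDITION & SPEC =====
def Spec_find_roots_from_sccs (sccs : List (List Int)) (adj_list : List (Int × List Int)) (out : List (List Int)) : Prop := out = find_roots_from_sccs_alt sccs adj_list
instance (sccs : List (List Int)) (adj_list : List (Int × List Int)) (out : List (List Int)) : Decidable (Spec_find_roots_from_sccs sccs adj_list out) := by unfold Spec_find_roots_from_sccs; infer_instance

-- ===== CLAIM (what is proved, stated in full; the proofs are below) =====
def Claim_equal_find_roots_from_sccs : Prop := ∀ (sccs : List (List Int)) (adj_list : List (Int × List Int)), Dom_find_roots_from_sccs sccs adj_list → Spec_find_roots_from_sccs sccs adj_list (find_roots_from_sccs sccs adj_list)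

-- ===== LEMMAS AND PROOFS =====

-- membership in a conditional-add fold over a set accumulator
lemma pv_mem_foldl_addIf (l : List Int) (c : Int → Bool) (T : PySem.Set Int) (n : Int) :
    n ∈ l.foldl (fun T m => if c m then PySem.Set.add T m else T) T ↔
      n ∈ T ∨ (n ∈ l ∧ c n = true) := by
  induction l generalizing T with
  | nil => simp
  | cons x xs ih =>
    simp only [List.foldl_cons]
    rw [ih]
    by_cases hx : c x = true
    · simp only [hx, if_true, PySem.Set.mem_add, List.mem_cons]
      by_cases hn : n = x
      · subst hn; simp [hx]
      · simp [hn]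
    · simp only [hx, List.mem_cons]
      by_cases hn : n = x
      · subst hn; simp [hx]
      · simp [hn]

-- membership in an edge-driven marking pass, for an arbitrary marking condition c
lemma pv_mem_targets (items : List (Int × List Int)) (c : Int → Int → Bool)
    (T : PySem.Set Int) (n : Int) :
    n ∈ items.foldl (fun T p =>
        p.2.foldl (fun T m => if c p.1 m then PySem.Set.add T m else T) T) T ↔
      n ∈ T ∨ ∃ p ∈ items, n ∈ p.2 ∧ c p.1 n = true := by
  induction items generalizing T with
  | nil => simp
  | cons p ps ih =>
    simp only [List.foldl_cons]
    rw [ih, pv_mem_foldl_addIf]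
    simp only [List.mem_cons]
    constructor
    · rintro ((h | ⟨h1, h2⟩) | ⟨q, hq, h1, h2⟩)
      · exact Or.inl h
      · exact Or.inr ⟨p, Or.inl rfl, h1, h2⟩
      · exact Or.inr ⟨q, Or.inr hq, h1, h2⟩
    · rintro (h | ⟨q, (rfl | hq), h1, h2⟩)
      · exact Or.inl (Or.inl h)
      · exact Or.inl (Or.inr ⟨h1, h2⟩)
      · exact Or.inr ⟨q, hq, h1, h2⟩

-- membership in the owners map built over `sccs` from a starting dictionary `d`
lemma pv_mem_owners_aux (sccs : List (List Int)) (d : PySem.Dict Int (List (PySem.Set Int)))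
    (u : Int) (s : PySem.Set Int) :
    s ∈ (sccs.foldl (fun d scc =>
        scc.foldl (fun d node => d.modify node [] (fun ls => ls ++ [PySem.Set.ofList scc])) d) d).getD u [] ↔
      s ∈ d.getD u [] ∨ ∃ scc ∈ sccs, u ∈ scc ∧ s = PySem.Set.ofList scc := by
  induction sccs generalizing d with
  | nil => simp
  | cons scc rest ih =>
    simp only [List.foldl_cons]
    rw [ih]
    have h := PySem.Dict.getD_foldl_modify_append
      (scc.map (fun node => (node, PySem.Set.ofList scc))) d u
    rw [List.foldl_map] at h
    rw [h]
    simp only [List.mem_append, List.mem_cons, List.mem_map, List.mem_filter]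
    constructor
    · rintro ((h1 | h1) | ⟨S, hS, hu, rfl⟩)
      · exact Or.inl h1
      · obtain ⟨q, ⟨⟨node, hnode, rfl⟩, hbeq⟩, rfl⟩ := h1
        simp only [beq_iff_eq] at hbeq
        exact Or.inr ⟨scc, Or.inl rfl, hbeq ▸ hnode, rfl⟩
      · exact Or.inr ⟨S, Or.inr hS, hu, rfl⟩
    · rintro (h1 | ⟨S, (rfl | hS), hu, rfl⟩)
      · exact Or.inl (Or.inl h1)
      · exact Or.inl (Or.inr ⟨(u, PySem.Set.ofList S), ⟨⟨u, hu, rfl⟩, by simp⟩, rfl⟩)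
      · exact Or.inr ⟨S, hS, hu, rfl⟩

lemma pv_mem_owners (sccs : List (List Int)) (u : Int) (s : PySem.Set Int) :
    s ∈ (pvOwners sccs).getD u [] ↔ ∃ scc ∈ sccs, u ∈ scc ∧ s = PySem.Set.ofList scc := by
  have e : pvOwners sccs = sccs.foldl (fun d scc =>
      scc.foldl (fun d node => d.modify node [] (fun ls => ls ++ [PySem.Set.ofList scc])) d)
      PySem.Dict.empty := rfl
  rw [e, pv_mem_owners_aux]
  simp

-- B's marking condition: some SCC owns u but not n
lemma pv_cond_iff (sccs : List (List Int)) (u n : Int) :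
    ((pvOwners sccs).getD u []).any (fun s => !(PySem.Set.contains s n)) = true ↔
      ∃ scc ∈ sccs, u ∈ scc ∧ n ∉ scc := by
  rw [List.any_eq_true]
  constructor
  · rintro ⟨s, hs, hc⟩
    obtain ⟨scc, hscc, hu, rfl⟩ := (pv_mem_owners sccs u s).mp hs
    refine ⟨scc, hscc, hu, ?_⟩
    intro hn
    simp only [Bool.not_eq_true'] at hc
    have ht : PySem.Set.contains (PySem.Set.ofList scc) n = true := by simp [pysem, hn]
    rw [ht] at hc
    simp at hc
  · rintro ⟨scc, hscc, hu, hn⟩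
    refine ⟨PySem.Set.ofList scc, (pv_mem_owners sccs u _).mpr ⟨scc, hscc, hu, rfl⟩, ?_⟩
    simp [pysem, hn]

-- the deduplicated item list is exactly first-match lookup
lemma pv_mem_firstItems_aux (adj : List (Int × List Int)) (acc : List (Int × List Int))
    (u : Int) (nbrs : List Int) :
    (u, nbrs) ∈ adj.foldl (fun acc kv => if acc.any (fun p => p.1 == kv.1) then acc else acc ++ [kv]) acc ↔
      (u, nbrs) ∈ acc ∨ (acc.any (fun p => p.1 == u) = false ∧ (PySem.Dict.mk adj).get? u = some nbrs) := by
  induction adj generalizing acc with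
  | nil => simp [PySem.Dict.get?]
  | cons kv rest ih =>
    obtain ⟨k, v⟩ := kv
    simp only [List.foldl_cons]
    rw [PySem.Dict.get?_mk_cons]
    by_cases h : (acc.any fun p => p.1 == k) = true
    · rw [if_pos h, ih]
      by_cases hk : k = u
      · have hfalse : ¬ ((acc.any fun p => p.1 == u) = false) := by
          rw [← hk]; simp [h]
        constructor
        · rintro (h1 | ⟨h2, _⟩)
          · exact Or.inl h1
          · exact absurd h2 hfalse
        · rintro (h1 | ⟨h2, _⟩)
          · exact Or.inl h1
          · exact absurd h2 hfalse
      · have hbeq : (k == u) = false := by simp [hk]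
        rw [hbeq]
        simp
    · rw [if_neg h, ih]
      by_cases hk : k = u
      · have hbt : (k == u) = true := by simp [hk]
        have hanyT : ((acc ++ [(k, v)]).any fun p => p.1 == u) = true := by
          simp [List.any_append, hbt]
        have haccF : (acc.any fun p => p.1 == u) = false := by
          rw [← hk]; exact Bool.eq_false_iff.mpr h
        rw [hbt]
        constructor
        · rintro (h1 | ⟨h2, _⟩)
          · rcases List.mem_append.mp h1 with h1 | h1
            · exact Or.inl h1
            · simp only [List.mem_singleton, Prod.mk.injEq] at h1
              exact Or.inr ⟨haccF, by simp [h1.2]⟩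
          · rw [hanyT] at h2; simp at h2
        · rintro (h1 | ⟨_, h3⟩)
          · exact Or.inl (List.mem_append.mpr (Or.inl h1))
          · simp only [if_true] at h3
            refine Or.inl (List.mem_append.mpr (Or.inr ?_))
            simp only [List.mem_singleton, Prod.mk.injEq]
            cases h3
            exact ⟨hk.symm, rfl⟩
      · have hbeq : (k == u) = false := by simp [hk]
        have hk' : ¬ u = k := fun e => hk e.symm
        rw [hbeq]
        simp only [List.mem_append, List.mem_singleton, Prod.mk.injEq, hk', false_and,
          or_false, List.any_append, List.any_cons, List.any_nil, hbeq, Bool.or_false]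
        tauto

lemma pv_mem_firstItems (adj : List (Int × List Int)) (u : Int) (nbrs : List Int) :
    (u, nbrs) ∈ pvFirstItems adj ↔ (PySem.Dict.mk adj).get? u = some nbrs := by
  unfold pvFirstItems
  rw [pv_mem_firstItems_aux]
  simp

-- membership in B's target set
lemma pv_mem_pvTargets (sccs : List (List Int)) (adj : List (Int × List Int)) (n : Int) :
    n ∈ pvTargets sccs adj ↔
      ∃ p ∈ pvFirstItems adj, n ∈ p.2 ∧ ∃ scc ∈ sccs, p.1 ∈ scc ∧ n ∉ scc := by
  have h := pv_mem_targets (pvFirstItems adj)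
    (fun u m => ((pvOwners sccs).getD u []).any (fun s => !(PySem.Set.contains s m)))
    PySem.Set.empty n
  refine (h.trans ?_)
  simp only [PySem.Set.empty, List.not_mem_nil, false_or]
  constructor
  · rintro ⟨p, hp, hn, hc⟩
    exact ⟨p, hp, hn, (pv_cond_iff sccs p.1 n).mp hc⟩
  · rintro ⟨p, hp, hn, hc⟩
    exact ⟨p, hp, hn, (pv_cond_iff sccs p.1 n).mpr hc⟩

-- membership in A's flattened target list
lemma pv_mem_allTargets (sccs : List (List Int)) (adj : List (Int × List Int)) (n : Int) :
    n ∈ sccs.foldl (fun acc scc =>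
        acc ++ scc.foldl (fun targets node =>
          targets ++ ((PySem.Dict.mk adj).getD node []).filter (fun m => !(scc.contains m))) []) [] ↔
      ∃ scc ∈ sccs, ∃ node ∈ scc, n ∈ (PySem.Dict.mk adj).getD node [] ∧ n ∉ scc := by
  rw [PySem.List.foldl_append_eq_flatMap]
  simp only [List.nil_append, List.mem_flatMap]
  constructor
  · rintro ⟨scc, hscc, hn⟩
    rw [PySem.List.foldl_append_eq_flatMap] at hn
    simp only [List.nil_append, List.mem_flatMap, List.mem_filter] at hn
    obtain ⟨node, hnode, hmem, hflt⟩ := hn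
    refine ⟨scc, hscc, node, hnode, hmem, ?_⟩
    simpa using hflt
  · rintro ⟨scc, hscc, node, hnode, hmem, hnotin⟩
    refine ⟨scc, hscc, ?_⟩
    rw [PySem.List.foldl_append_eq_flatMap]
    simp only [List.nil_append, List.mem_flatMap, List.mem_filter]
    exact ⟨node, hnode, hmem, by simpa using hnotin⟩

-- the crux: A's target set and B's target set have the same members
lemma pv_targets_agree (sccs : List (List Int)) (adj : List (Int × List Int)) (n : Int) :
    (∃ scc ∈ sccs, ∃ node ∈ scc, n ∈ (PySem.Dict.mk adj).getD node [] ∧ n ∉ scc) ↔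
      n ∈ pvTargets sccs adj := by
  rw [pv_mem_pvTargets]
  constructor
  · rintro ⟨scc, hscc, node, hnode, hmem, hnotin⟩
    rw [PySem.Dict.getD_eq_get?_getD] at hmem
    rcases hget : (PySem.Dict.mk adj).get? node with _ | nbrs
    · rw [hget] at hmem; simp at hmem
    · rw [hget] at hmem
      exact ⟨(node, nbrs), (pv_mem_firstItems adj node nbrs).mpr hget, hmem,
        scc, hscc, hnode, hnotin⟩
  · rintro ⟨⟨u, nbrs⟩, hp, hmem, scc, hscc, hu, hnotin⟩
    have hget := (pv_mem_firstItems adj u nbrs).mp hp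
    refine ⟨scc, hscc, u, hu, ?_, hnotin⟩
    rw [PySem.Dict.getD_eq_get?_getD, hget]
    exact hmem

-- A's port, let-expanded (definitional)
lemma pv_A_eq (sccs : List (List Int)) (adj : List (Int × List Int)) :
    find_roots_from_sccs sccs adj =
      sccs.filter (fun scc => !(scc.any (fun node =>
        (PySem.Set.ofList (sccs.foldl (fun acc scc =>
          acc ++ scc.foldl (fun targets node =>
            targets ++ ((PySem.Dict.mk adj).getD node []).filter (fun m => !(scc.contains m))) []) [])).contains node))) := rfl

-- ===== VERDICT (by name: the statement is the Claim_ definition above) =====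
theorem find_roots_from_sccs_spec : Claim_equal_find_roots_from_sccs := by
  intro sccs adj _
  unfold Spec_find_roots_from_sccs find_roots_from_sccs_alt
  rw [pv_A_eq]
  apply List.filter_congr
  intro scc _
  have hdis : PySem.Set.isdisjoint (pvTargets sccs adj) scc = true ↔
      ∀ x ∈ pvTargets sccs adj, x ∉ scc := by simp [PySem.Set.isdisjoint]
  have hmem : ∀ x : Int,
      ((PySem.Set.ofList (sccs.foldl (fun acc scc =>
        acc ++ scc.foldl (fun targets node =>
          targets ++ ((PySem.Dict.mk adj).getD node []).filter (fun m => !(scc.contains m))) []) [])).contains x) = true ↔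
      x ∈ pvTargets sccs adj := by
    intro x
    rw [show ∀ l : List Int, (((PySem.Set.ofList l).contains x) = true) ↔ x ∈ l from
      fun l => by simp [pysem]]
    rw [pv_mem_allTargets]
    exact pv_targets_agree sccs adj x
  rw [Bool.eq_iff_iff, Bool.not_eq_true', List.any_eq_false, hdis]
  constructor
  · intro h x hx hxs
    have hx2 := h x hxs
    rw [hmem x] at hx2
    exact hx2 hx
  · intro h x hxs hcont
    exact h x ((hmem x).mp hcont) hxs
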